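-- pv_equiv track=rewrite | github.com/icy17/MFPair | Preprocess/split_sentence.py | get_first_desc
-- ===== SOURCE A (Python) =====
-- def get_first_desc(doc):
--     sentence = doc['desc']
--     sentence = sentence.strip(' ')
--     sentence = sentence.strip('\n')
--     sentences = sentence.split('.')
--     first_one = ''
--     for sentence in sentences:
--         if len(sentence) != 0:
--             first_one = sentence
--             break
--     return first_one
-- ===== SOURCE B (Python) =====
-- def get_first_desc(doc):
--     s = doc['desc'].strip(' ').strip('\n')
--     n = len(s)
--     i = 0
--     while i < n and s[i] == '.':
--         i += 1
--     j = i
--     while j < n and s[j] != '.':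
--         j += 1
--     return s[i:j]
-- ===== Notes on version B (the rewrite author's own statement) =====
-- stated objective: simpler
-- what changed: B replaces split('.') plus a scan over the resulting segment list by a direct two-pointer character scan: skip the leading run of periods, then take the maximal run of non-period characters; no intermediate list of segments is built.
import Mathlib
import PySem

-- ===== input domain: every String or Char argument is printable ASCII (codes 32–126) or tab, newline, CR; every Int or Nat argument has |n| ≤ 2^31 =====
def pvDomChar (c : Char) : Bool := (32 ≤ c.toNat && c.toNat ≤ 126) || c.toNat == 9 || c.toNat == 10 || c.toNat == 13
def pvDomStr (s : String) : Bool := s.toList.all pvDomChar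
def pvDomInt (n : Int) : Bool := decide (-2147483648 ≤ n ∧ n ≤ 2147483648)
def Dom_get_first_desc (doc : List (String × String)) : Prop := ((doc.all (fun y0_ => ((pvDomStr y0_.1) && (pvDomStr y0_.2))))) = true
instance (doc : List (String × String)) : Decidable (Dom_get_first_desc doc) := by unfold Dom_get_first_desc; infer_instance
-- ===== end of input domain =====

-- B replaces split('.') + a scan over the segment list by a direct character scan
-- (skip leading periods, take the run of non-periods); objective: simpler, same O(n) cost.

-- ===== PORT A =====
-- 'for sentence in sentences: if len(sentence) != 0: first_one = sentence; break'
def getFirstLoopA : List String → String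
  | [] => ""
  | s :: rest => if PySem.Str.len s ≠ 0 then s else getFirstLoopA rest

def get_first_desc (doc : List (String × String)) : String :=
  match (PySem.Dict.ofList doc).get? "desc" with
  | none => ""            -- KeyError in Python; excluded by Pre_
  | some s =>
    let s1 := PySem.Str.stripChars s " "
    let s2 := PySem.Str.stripChars s1 "\n"
    match PySem.Str.split? s2 "." with
    | none => ""          -- unreachable: "." ≠ ""
    | some sentences => getFirstLoopA sentences

-- ===== PORT B =====
-- Source B scans the characters once: the first while loop advances i past the leading
-- run of '.' (= dropWhile), the second advances j to the next '.' (= takeWhile),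
-- and returns s[i:j], the run between the two pointers. Exact on all inputs.
def get_first_desc_alt (doc : List (String × String)) : String :=
  match (PySem.Dict.ofList doc).get? "desc" with
  | none => ""            -- KeyError in Python; excluded by Pre_
  | some s =>
    let t := (PySem.Str.stripChars (PySem.Str.stripChars s " ") "\n").toList
    String.ofList ((t.dropWhile (fun c => c == '.')).takeWhile (fun c => !(c == '.')))

-- ===== PRECONDITION & SPEC =====
-- Pre_: the dict has a 'desc' key (otherwise Python A raises KeyError).
def Pre_get_first_desc (doc : List (String × String)) : Prop :=
  ((PySem.Dict.ofList doc).get? "desc").isSome = true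
instance (doc : List (String × String)) : Decidable (Pre_get_first_desc doc) := by
  unfold Pre_get_first_desc; infer_instance

def pvWitness_get_first_desc : (List (String × String)) := [("desc", "Hello world. Second.")]

def Spec_get_first_desc (doc : List (String × String)) (out : String) : Prop := out = get_first_desc_alt doc
instance (doc : List (String × String)) (out : String) : Decidable (Spec_get_first_desc doc out) := by unfold Spec_get_first_desc; infer_instance

-- ===== CLAIM (what is proved, stated in full; the proofs are below) =====
def Claim_equal_get_first_desc : Prop := ∀ (doc : List (String × String)), Dom_get_first_desc doc → Pre_get_first_desc doc → Spec_get_first_desc doc (get_first_desc doc)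

-- ===== LEMMAS AND PROOFS =====

-- first non-empty segment, on the char-list side
def fnc : List (List Char) → List Char
  | [] => []
  | x :: xs => if x.length ≠ 0 then x else fnc xs

lemma getFirstLoopA_map (xs : List (List Char)) :
    getFirstLoopA (xs.map String.ofList) = String.ofList (fnc xs) := by
  induction xs with
  | nil => rfl
  | cons x xs ih =>
    simp only [List.map, getFirstLoopA, fnc, PySem.Str.len, String.toList_ofList]
    split_ifs with h h' h'
    · rfl
    · omega
    · omega
    · exact ih

lemma fnc_append (as bs : List (List Char)) (h : ∀ x ∈ as, x = []) :
    fnc (as ++ bs) = fnc bs := by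
  induction as with
  | nil => rfl
  | cons a as ih =>
    have ha : a = [] := h a (by simp)
    subst ha
    simp only [List.cons_append, fnc, List.length_nil]
    simpa using ih (fun y hy => h y (by simp [hy]))

lemma go_append (sep : List Char) (fuel : Nat) (l cur : List Char) (acc : List (List Char)) :
    PySem.Chars.splitOn.go sep fuel l cur acc = acc.reverse ++ PySem.Chars.splitOn.go sep fuel l cur [] := by
  induction fuel generalizing l cur acc with
  | zero =>
    rw [PySem.Chars.splitOn.go.eq_def, PySem.Chars.splitOn.go.eq_def]; simp
  | succ fuel ih =>
    rw [PySem.Chars.splitOn.go.eq_def]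
    conv_rhs => rw [PySem.Chars.splitOn.go.eq_def]
    match l with
    | [] => simp
    | c :: rest =>
      simp only
      split_ifs with h
      · rw [ih _ _ (cur.reverse :: acc), ih _ _ (cur.reverse :: [])]
        simp
      · exact ih _ _ _

-- the heart: first non-empty segment of go ['.'] = cur.reverse ++ the run of non-periods
lemma go_fnc (fuel : Nat) (l cur : List Char) (hfuel : l.length ≤ fuel) :
    fnc (PySem.Chars.splitOn.go ['.'] fuel l cur []) =
      if cur = [] then (l.dropWhile (fun c => c == '.')).takeWhile (fun c => !(c == '.'))
      else cur.reverse ++ l.takeWhile (fun c => !(c == '.')) := by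
  induction fuel generalizing l cur with
  | zero =>
    have hl : l = [] := by
      cases l with
      | nil => rfl
      | cons a l => simp at hfuel
    subst hl
    rw [PySem.Chars.splitOn.go.eq_def]
    simp only [List.append_nil, List.reverse_cons, List.reverse_nil, List.nil_append]
    rcases eq_or_ne cur [] with h | h
    · subst h; rfl
    · have hlen : cur.reverse.length ≠ 0 := by simpa using h
      simp [fnc, h]
  | succ fuel ih =>
    cases l with
    | nil =>
      rw [PySem.Chars.splitOn.go.eq_def]
      simp only [List.reverse_cons, List.reverse_nil, List.nil_append]
      rcases eq_or_ne cur [] with h | h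
      · subst h; rfl
      · have hlen : cur.reverse.length ≠ 0 := by simpa using h
        simp [fnc, h]
    | cons c rest =>
      rw [PySem.Chars.splitOn.go.eq_def]
      simp only [List.length_cons] at hfuel
      by_cases hc : c = '.'
      · subst hc
        have hpre : (['.'].isPrefixOf ('.' :: rest)) = true := by
          simp [List.isPrefixOf]
        simp only [hpre, if_true, List.length_cons, List.length_nil, List.drop_succ_cons,
          List.drop_zero]
        rw [go_append]
        rcases eq_or_ne cur [] with hcur | hcur
        · subst hcur
          simp only [List.reverse_nil, List.reverse_cons, List.nil_append, if_true]
          rw [fnc_append _ _ (by intro x hx; simpa using hx)]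
          rw [ih rest [] (by omega)]
          simp [List.dropWhile]
        · have hlen : cur.reverse.length ≠ 0 := by simpa using hcur
          simp only [List.reverse_cons, List.reverse_nil, List.nil_append, List.cons_append]
          rw [if_neg hcur]
          rw [show ∀ xs, fnc (cur.reverse :: xs) = cur.reverse from fun xs => by
            simp only [fnc]; rw [if_pos hlen]]
          simp [List.takeWhile]
      · have hcb : (c == '.') = false := by simpa using hc
        have hpre : (['.'].isPrefixOf (c :: rest)) = false := by
          simp [List.isPrefixOf]
          intro hh
          exact absurd hh.symm hc
        simp only [hpre, Bool.false_eq_true, if_false]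
        rw [ih rest (c :: cur) (by omega)]
        rw [if_neg (by simp)]
        rcases eq_or_ne cur [] with hcur | hcur
        · subst hcur
          simp [List.dropWhile, hcb]
        · rw [if_neg hcur]
          simp [List.takeWhile, hcb]

lemma splitOn_fnc (l : List Char) :
    fnc (PySem.Chars.splitOn l ['.']) =
      (l.dropWhile (fun c => c == '.')).takeWhile (fun c => !(c == '.')) := by
  have := go_fnc (l.length + 1) l [] (by omega)
  simpa [PySem.Chars.splitOn] using this

-- ===== VERDICT (by name: the statement is the Claim_ definition above) =====
theorem get_first_desc_spec : Claim_equal_get_first_desc := by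
  intro doc _ hpre
  unfold Spec_get_first_desc get_first_desc get_first_desc_alt
  unfold Pre_get_first_desc at hpre
  cases hget : (PySem.Dict.ofList doc).get? "desc" with
  | none => simp [hget] at hpre
  | some s =>
    have hsplit : PySem.Str.split? (PySem.Str.stripChars (PySem.Str.stripChars s " ") "\n") "." =
        some ((PySem.Chars.splitOn (PySem.Str.stripChars (PySem.Str.stripChars s " ") "\n").toList ['.']).map String.ofList) := by
      simp [PySem.Str.split?, PySem.Chars.split?]
    simp only [hsplit, getFirstLoopA_map, splitOn_fnc]
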